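-- pv_equiv track=rewrite | github.com/yakuza8/competitive-programming | python/isomorphic_strings.py | _is_iso
-- ===== SOURCE A (Python) =====
-- def _is_iso(s, t):
--     char_mapping = {}
--     for ch1, ch2 in zip(s, t):
--         if ch1 in char_mapping:
--             if char_mapping[ch1] != ch2:
--                 return False
--         else:
--             char_mapping[ch1] = ch2
--     return True
-- ===== SOURCE B (Python) =====
-- def _is_iso(s, t):
--     pairs = set(zip(s, t))
--     firsts = {a for a, _ in pairs}
--     return len(pairs) == len(firsts)
-- ===== Notes on version B (the rewrite author's own statement) =====
-- stated objective: simpler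
-- what changed: Replaces the incremental dict-consistency scan with a single zip pass building the set of (ch1, ch2) pairs and comparing its cardinality with the number of distinct first characters.
import Mathlib
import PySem

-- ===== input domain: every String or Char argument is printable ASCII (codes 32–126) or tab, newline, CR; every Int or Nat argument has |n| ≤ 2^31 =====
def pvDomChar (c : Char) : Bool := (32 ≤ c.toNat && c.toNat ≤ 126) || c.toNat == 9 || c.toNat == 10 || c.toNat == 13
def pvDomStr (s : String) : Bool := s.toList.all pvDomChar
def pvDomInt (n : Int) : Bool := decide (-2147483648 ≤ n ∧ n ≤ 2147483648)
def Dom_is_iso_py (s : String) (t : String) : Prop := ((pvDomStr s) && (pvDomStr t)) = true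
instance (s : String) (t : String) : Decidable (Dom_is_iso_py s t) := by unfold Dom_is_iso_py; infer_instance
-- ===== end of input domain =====

-- B replaces A's incremental dict-consistency scan by building the set of zipped (ch1, ch2)
-- pairs once and comparing its cardinality with the number of distinct first characters (simpler).


-- ===== PORT A =====
-- the 'for ch1, ch2 in zip(s, t)' loop with early 'return False', carrying char_mapping
def pvIsoLoop : List (Char × Char) → PySem.Dict Char Char → Bool
  | [], _ => true
  | (a, b) :: rest, d =>
    match d.get? a with
    | some c => if c ≠ b then false else pvIsoLoop rest d
    | none => pvIsoLoop rest (d.insert a b)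

def is_iso_py (s : String) (t : String) : Bool :=
  pvIsoLoop (s.toList.zip t.toList) PySem.Dict.empty

-- ===== PORT B =====
def is_iso_py_alt (s : String) (t : String) : Bool :=
  let pairs : PySem.Set (Char × Char) := PySem.Set.ofList (s.toList.zip t.toList)
  let firsts : PySem.Set Char := PySem.Set.ofList (pairs.map Prod.fst)
  PySem.Set.len pairs == PySem.Set.len firsts

-- ===== PRECONDITION & SPEC =====
def Spec_is_iso_py (s : String) (t : String) (out : Bool) : Prop := out = is_iso_py_alt s t
instance (s : String) (t : String) (out : Bool) : Decidable (Spec_is_iso_py s t out) := by unfold Spec_is_iso_py; infer_instance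

-- ===== CLAIM (what is proved, stated in full; the proofs are below) =====
def Claim_equal_is_iso_py : Prop := ∀ (s : String) (t : String), Dom_is_iso_py s t → Spec_is_iso_py s t (is_iso_py s t)

-- ===== LEMMAS AND PROOFS =====

-- the property both programs decide: the zipped pairs are a consistent char mapping
def pvConsistent (zs : List (Char × Char)) : Prop :=
  ∀ p ∈ zs, ∀ q ∈ zs, p.1 = q.1 → p.2 = q.2

lemma pvIsoLoop_true_iff (zs : List (Char × Char)) (d : PySem.Dict Char Char) :
    pvIsoLoop zs d = true ↔
      ((∀ p ∈ zs, ∀ c, d.get? p.1 = some c → c = p.2) ∧ pvConsistent zs) := by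
  induction zs generalizing d with
  | nil => simp [pvIsoLoop, pvConsistent]
  | cons hd rest ih =>
    obtain ⟨a, b⟩ := hd
    rcases hg : d.get? a with _ | c
    · -- new key: insert
      rw [show pvIsoLoop ((a, b) :: rest) d = pvIsoLoop rest (d.insert a b) by
            simp [pvIsoLoop, hg]]
      rw [ih]
      constructor
      · rintro ⟨hcomp, hcons⟩
        refine ⟨?_, ?_⟩
        · rintro p hp c hc
          rcases List.mem_cons.mp hp with hp | hp
          · subst hp; simp [hg] at hc
          · by_cases hpa : p.1 = a
            · rw [hpa, hg] at hc; cases hc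
            · exact hcomp p hp c (by rw [PySem.Dict.get?_insert, if_neg hpa, hc])
        · rintro p hp q hq hpq
          rcases List.mem_cons.mp hp with hp | hp <;> rcases List.mem_cons.mp hq with hq | hq
          · subst hp; subst hq; rfl
          · subst hp
            exact hcomp q hq b (by rw [← hpq, PySem.Dict.get?_insert]; simp)
          · subst hq
            exact (hcomp p hp b (by rw [PySem.Dict.get?_insert, if_pos hpq])).symm
          · exact hcons p hp q hq hpq
      · rintro ⟨hcomp, hcons⟩
        refine ⟨?_, ?_⟩
        · rintro p hp c hc
          rw [PySem.Dict.get?_insert] at hc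
          by_cases hpa : p.1 = a
          · rw [if_pos hpa] at hc
            cases hc
            exact (hcons (a, b) (by simp) p (List.mem_cons_of_mem _ hp) hpa.symm)
          · rw [if_neg hpa] at hc
            exact hcomp p (List.mem_cons_of_mem _ hp) c hc
        · rintro p hp q hq hpq
          exact hcons p (List.mem_cons_of_mem _ hp) q (List.mem_cons_of_mem _ hq) hpq
    · -- existing key
      rw [show pvIsoLoop ((a, b) :: rest) d = if c ≠ b then false else pvIsoLoop rest d by
            simp [pvIsoLoop, hg]]
      by_cases hcb : c = b
      · rw [if_neg (show ¬ (c ≠ b) by simp [hcb])]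
        rw [ih]
        constructor
        · rintro ⟨hcomp, hcons⟩
          refine ⟨?_, ?_⟩
          · rintro p hp c' hc'
            rcases List.mem_cons.mp hp with hp | hp
            · subst hp; rw [hg] at hc'; cases hc'; exact hcb
            · exact hcomp p hp c' hc'
          · rintro p hp q hq hpq
            rcases List.mem_cons.mp hp with hp | hp <;> rcases List.mem_cons.mp hq with hq | hq
            · subst hp; subst hq; rfl
            · subst hp
              rw [← hcb]
              exact hcomp q hq c (by rw [← hpq, hg])
            · subst hq
              rw [← hcb] at hpq ⊢
              exact (hcomp p hp c (by rw [hpq, hg])).symm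
            · exact hcons p hp q hq hpq
        · rintro ⟨hcomp, hcons⟩
          exact ⟨fun p hp c' hc' => hcomp p (List.mem_cons_of_mem _ hp) c' hc',
                 fun p hp q hq hpq =>
                   hcons p (List.mem_cons_of_mem _ hp) q (List.mem_cons_of_mem _ hq) hpq⟩
      · rw [if_pos hcb]
        constructor
        · intro h; exact absurd h (by simp)
        · rintro ⟨hcomp, _⟩
          exact absurd (hcomp (a, b) ((by simp)) c hg) hcb

lemma pvOfList_sublist {α : Type} [BEq α] [LawfulBEq α] (l : List α) :
    (PySem.Set.ofList l).Sublist l := by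
  induction l with
  | nil => simp [PySem.Set.ofList_nil]
  | cons x xs ih =>
    rw [PySem.Set.ofList_cons]
    refine List.Sublist.cons₂ x (List.Sublist.trans ?_ ih)
    simp only [PySem.Set.discard]
    exact List.filter_sublist

lemma pvOfList_length_eq_iff {α : Type} [BEq α] [LawfulBEq α] (l : List α) :
    (PySem.Set.ofList l).length = l.length ↔ l.Nodup := by
  constructor
  · intro h
    have := (pvOfList_sublist l).eq_of_length h
    rw [← this]
    exact PySem.Set.nodup_ofList l
  · intro h
    rw [PySem.Set.ofList_eq_self_of_nodup l h]

lemma pvAlt_true_iff (s t : String) :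
    is_iso_py_alt s t = true ↔ pvConsistent (s.toList.zip t.toList) := by
  set zs := s.toList.zip t.toList with hzs
  set D := PySem.Set.ofList zs with hD
  have hDn : D.Nodup := PySem.Set.nodup_ofList zs
  have hmem : ∀ p, p ∈ D ↔ p ∈ zs := fun p => PySem.Set.mem_ofList zs p
  simp only [is_iso_py_alt, PySem.Set.len, ← hzs, ← hD, beq_iff_eq, Nat.cast_inj]
  rw [show (D.length = (PySem.Set.ofList (D.map Prod.fst)).length) ↔
        ((PySem.Set.ofList (D.map Prod.fst)).length = (D.map Prod.fst).length) by
        rw [List.length_map]; exact eq_comm]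
  rw [pvOfList_length_eq_iff]
  constructor
  · intro hnod p hp q hq hpq
    have := List.inj_on_of_nodup_map hnod ((hmem p).mpr hp) ((hmem q).mpr hq) hpq
    rw [this]
  · intro hcons
    refine List.Nodup.map_on ?_ hDn
    rintro p hp q hq hpq
    have h2 := hcons p ((hmem p).mp hp) q ((hmem q).mp hq) hpq
    exact Prod.ext hpq h2

lemma pvA_true_iff (s t : String) :
    is_iso_py s t = true ↔ pvConsistent (s.toList.zip t.toList) := by
  rw [is_iso_py, pvIsoLoop_true_iff]
  simp [PySem.Dict.get?_empty]

-- ===== VERDICT (by name: the statement is the Claim_ definition above) =====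
theorem is_iso_py_spec : Claim_equal_is_iso_py := by
  intro s t _
  unfold Spec_is_iso_py
  rw [Bool.eq_iff_iff, pvA_true_iff, pvAlt_true_iff]
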